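-- pv_equiv track=rewrite | github.com/LucasGermanBollini/pythonTrabajos | TP6-Finales.py | digitosContar
-- ===== SOURCE A (Python) =====
-- def digitosContar(b):
--     numero2 = b
--     contador = 0
--     while b > 0:
--         b = b // 10
--         contador = contador + 1
--     contador2 = contador
--     if contador % 2 == 0:
--         return -1
--     else:
--         while contador > (contador2 // 2 + 1):
--             numero2 = numero2 // 10
--             contador = contador - 1
--         return numero2 % 10
-- ===== SOURCE B (Python) =====
-- def digitosContar(b):
--     if b <= 0:
--         return -1
--     hi = mid = b
--     while hi >= 100:
--         hi //= 100
--         mid //= 10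
--     return -1 if hi >= 10 else mid % 10
-- ===== Notes on version B (the rewrite author's own statement) =====
-- stated objective: alternative
-- what changed: Replaces A's two sequential while loops (count all digits with repeated //10, then strip digits down to the middle) by a single two-speed loop that divides a fast copy by a hundred and a slow copy by ten; when the fast copy drops below a hundred the slow copy holds the middle digit (one digit left = odd count, two = even).
import Mathlib
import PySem

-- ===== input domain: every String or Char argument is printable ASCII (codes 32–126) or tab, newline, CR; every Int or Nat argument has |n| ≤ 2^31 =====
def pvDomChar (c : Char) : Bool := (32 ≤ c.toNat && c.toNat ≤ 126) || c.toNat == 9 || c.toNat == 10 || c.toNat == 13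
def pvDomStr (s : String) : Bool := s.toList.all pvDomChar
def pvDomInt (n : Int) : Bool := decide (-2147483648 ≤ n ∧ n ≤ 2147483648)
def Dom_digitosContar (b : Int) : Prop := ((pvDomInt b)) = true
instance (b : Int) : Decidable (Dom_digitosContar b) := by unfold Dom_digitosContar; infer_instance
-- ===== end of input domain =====

-- B replaces A's two sequential while loops (count all digits, then strip half of them)
-- by a single two-speed loop (a fast copy divided by a hundred and a slow copy by ten); alternative, not claimed faster.

-- ===== PORT A =====
-- 'while b > 0: b //= 10; contador += 1'
def pvCountLoop (b contador : Int) : Int :=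
  if h : b > 0 then pvCountLoop (PySem.Int.floordiv b 10) (contador + 1) else contador
termination_by b.toNat
decreasing_by
  have : PySem.Int.floordiv b 10 = b / 10 := PySem.Int.floordiv_eq_ediv_of_pos (by omega)
  rw [this]; omega

-- 'while contador > target: numero2 //= 10; contador -= 1'  (target = contador2 // 2 + 1)
def pvStripLoop (numero2 contador target : Int) : Int :=
  if _h : contador > target then
    pvStripLoop (PySem.Int.floordiv numero2 10) (contador - 1) target
  else numero2
termination_by (contador - target).toNat
decreasing_by omega

-- numero2 = b and contador2 = contador never change before they are read, so they stay names for those values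
def digitosContar (b : Int) : Int :=
  let contador := pvCountLoop b 0
  if PySem.Int.mod contador 2 = 0 then -1
  else PySem.Int.mod (pvStripLoop b contador (PySem.Int.floordiv contador 2 + 1)) 10

-- ===== PORT B =====
-- 'while hi >= 100: hi //= 100; mid //= 10'
def pvAltLoop (hi mid : Int) : Int × Int :=
  if h : hi ≥ 100 then pvAltLoop (PySem.Int.floordiv hi 100) (PySem.Int.floordiv mid 10) else (hi, mid)
termination_by hi.toNat
decreasing_by
  have : PySem.Int.floordiv hi 100 = hi / 100 := PySem.Int.floordiv_eq_ediv_of_pos (by omega)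
  rw [this]; omega

def digitosContar_alt (b : Int) : Int :=
  if b ≤ 0 then -1
  else
    let p := pvAltLoop b b
    if p.1 ≥ 10 then -1 else PySem.Int.mod p.2 10

-- ===== PRECONDITION & SPEC =====
def Spec_digitosContar (b : Int) (out : Int) : Prop := out = digitosContar_alt b
instance (b : Int) (out : Int) : Decidable (Spec_digitosContar b out) := by unfold Spec_digitosContar; infer_instance

-- ===== CLAIM (what is proved, stated in full; the proofs are below) =====
def Claim_equal_digitosContar : Prop := ∀ (b : Int), Dom_digitosContar b → Spec_digitosContar b (digitosContar b)

-- ===== LEMMAS AND PROOFS =====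

theorem fd10 (x : Int) : PySem.Int.floordiv x 10 = x / 10 :=
  PySem.Int.floordiv_eq_ediv_of_pos (by norm_num)

theorem fd100 (x : Int) : PySem.Int.floordiv x 100 = x / 100 :=
  PySem.Int.floordiv_eq_ediv_of_pos (by norm_num)

theorem md (x : Int) : PySem.Int.mod x 2 = x % 2 :=
  PySem.Int.mod_eq_emod_of_pos (by norm_num)

theorem pow100 (j : Nat) : (100:Int) ^ j = 10 ^ (j + j) := by
  have : (100:Int) = 10 ^ 2 := by norm_num
  rw [this, ← pow_mul]; ring_nf

theorem count_loop_eq (n : Nat) : ∀ (b c : Int), 10 ^ n ≤ b → b < 10 ^ (n + 1) →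
    pvCountLoop b c = c + n + 1 := by
  induction n with
  | zero =>
    intro b c h1 h2
    simp only [pow_zero] at h1; rw [pow_one] at h2
    rw [pvCountLoop, dif_pos (by omega), fd10]
    have hz : b / 10 = 0 := by omega
    rw [hz, pvCountLoop, dif_neg (by omega)]
    simp
  | succ n ih =>
    intro b c h1 h2
    have hb : 0 < b := lt_of_lt_of_le (by positivity) h1
    rw [pvCountLoop, dif_pos (by omega), fd10]
    have hlo : 10 ^ n ≤ b / 10 := by
      rw [Int.le_ediv_iff_mul_le (by norm_num)]
      calc (10:Int) ^ n * 10 = 10 ^ (n + 1) := by ring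
        _ ≤ b := h1
    have hhi : b / 10 < 10 ^ (n + 1) := by
      rw [Int.ediv_lt_iff_lt_mul (by norm_num)]
      calc b < 10 ^ (n + 1 + 1) := h2
        _ = 10 ^ (n + 1) * 10 := by ring
    rw [ih _ _ hlo hhi]
    push_cast; ring

theorem strip_loop_eq (m : Nat) : ∀ (x c t : Int), c = t + m →
    pvStripLoop x c t = x / 10 ^ m := by
  induction m with
  | zero => intro x c t h; rw [pvStripLoop, dif_neg (by omega)]; simp
  | succ m ih =>
    intro x c t h
    rw [pvStripLoop, dif_pos (by push_cast at h; omega), fd10,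
      ih _ _ _ (by push_cast at h ⊢; omega), Int.ediv_ediv_of_nonneg (by norm_num)]
    congr 1
    push_cast; ring

theorem alt_loop_eq (n : Nat) : ∀ (hi mid : Int), 100 ^ n ≤ hi → hi < 100 ^ (n + 1) →
    pvAltLoop hi mid = (hi / 100 ^ n, mid / 10 ^ n) := by
  induction n with
  | zero =>
    intro hi mid h1 h2
    rw [pow_one] at h2
    rw [pvAltLoop, dif_neg (by omega)]
    simp
  | succ n ih =>
    intro hi mid h1 h2
    have h100 : (100:Int) ≤ hi := by
      refine le_trans ?_ h1
      calc (100:Int) = 100 ^ 1 := (pow_one 100).symm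
        _ ≤ 100 ^ (n + 1) := pow_le_pow_right₀ (by norm_num) (by omega)
    rw [pvAltLoop, dif_pos (by omega), fd100, fd10]
    have hlo : 100 ^ n ≤ hi / 100 := by
      rw [Int.le_ediv_iff_mul_le (by norm_num)]
      calc (100:Int) ^ n * 100 = 100 ^ (n + 1) := by ring
        _ ≤ hi := h1
    have hhi : hi / 100 < 100 ^ (n + 1) := by
      rw [Int.ediv_lt_iff_lt_mul (by norm_num)]
      calc hi < 100 ^ (n + 1 + 1) := h2
        _ = 100 ^ (n + 1) * 100 := by ring
    rw [ih _ _ hlo hhi, Int.ediv_ediv_of_nonneg (by norm_num),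
      Int.ediv_ediv_of_nonneg (by norm_num)]
    have e1 : (100:Int) * 100 ^ n = 100 ^ (n + 1) := (pow_succ' 100 n).symm
    have e2 : (10:Int) * 10 ^ n = 10 ^ (n + 1) := (pow_succ' 10 n).symm
    rw [e1, e2]

theorem exists_digit_bracket (b : Int) (hb : 0 < b) :
    ∃ k : Nat, 10 ^ k ≤ b ∧ b < 10 ^ (k + 1) := by
  refine ⟨Nat.log 10 b.toNat, ?_, ?_⟩
  · have := Nat.pow_log_le_self 10 (x := b.toNat) (by omega)
    calc (10:Int) ^ Nat.log 10 b.toNat = ((10 ^ Nat.log 10 b.toNat : Nat) : Int) := by push_cast; ring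
      _ ≤ (b.toNat : Int) := by exact_mod_cast this
      _ = b := by omega
  · have := Nat.lt_pow_succ_log_self (b := 10) (by norm_num) b.toNat
    calc b = (b.toNat : Int) := by omega
      _ < ((10 ^ (Nat.log 10 b.toNat + 1) : Nat) : Int) := by exact_mod_cast this
      _ = 10 ^ (Nat.log 10 b.toNat + 1) := by push_cast; ring

theorem main_lemma : ∀ (b : Int), digitosContar b = digitosContar_alt b := by
  intro b
  by_cases hb : b ≤ 0
  · have hc : pvCountLoop b 0 = 0 := by rw [pvCountLoop, dif_neg (by omega)]
    rw [digitosContar, digitosContar_alt, if_pos hb]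
    simp only [hc, md]
    norm_num
  · push_neg at hb
    obtain ⟨k, hlo, hhi⟩ := exists_digit_bracket b hb
    rcases Nat.even_or_odd k with ⟨j, hj⟩ | ⟨j, hj⟩
    · -- k = j + j : odd digit count j + j + 1, both return the middle digit (b / 10^j) % 10
      subst hj
      have hc : pvCountLoop b 0 = (j:Int) + j + 1 := by
        rw [count_loop_eq (j + j) b 0 hlo hhi]; push_cast; ring
      have hmod : PySem.Int.mod ((j:Int) + j + 1) 2 = 1 := by rw [md]; omega
      have hfd : PySem.Int.floordiv ((j:Int) + j + 1) 2 = (j:Int) := by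
        rw [PySem.Int.floordiv_eq_ediv_of_pos (by norm_num)]; omega
      have hstrip : pvStripLoop b ((j:Int) + j + 1) ((j:Int) + 1) = b / 10 ^ j :=
        strip_loop_eq j b _ _ (by push_cast; ring)
      have hA : digitosContar b = PySem.Int.mod (b / 10 ^ j) 10 := by
        rw [digitosContar]
        simp only [hc, hmod, hfd]
        norm_num [hstrip]
      have hlo' : (100:Int) ^ j ≤ b := by rw [pow100]; exact hlo
      have hhi' : b < 100 ^ (j + 1) := by
        rw [pow100]
        calc b < 10 ^ (j + j + 1) := hhi
          _ ≤ 10 ^ (j + 1 + (j + 1)) := pow_le_pow_right₀ (by norm_num) (by omega)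
      have hpow : (0:Int) < 100 ^ j := by positivity
      have hh10 : b / 100 ^ j < 10 := by
        rw [Int.ediv_lt_iff_lt_mul hpow, pow100]
        calc b < 10 ^ (j + j + 1) := hhi
          _ = 10 ^ (j + j) * 10 := pow_succ 10 (j + j)
          _ = 10 * 10 ^ (j + j) := mul_comm _ _
      have hB : digitosContar_alt b = PySem.Int.mod (b / 10 ^ j) 10 := by
        rw [digitosContar_alt, if_neg (by omega)]
        simp only [alt_loop_eq j b b hlo' hhi']
        rw [if_neg (by simp; omega)]
      rw [hA, hB]
    · -- k = 2j + 1 : even digit count 2j + 2, both return -1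
      subst hj
      have hc : pvCountLoop b 0 = (j:Int) + j + 2 := by
        rw [count_loop_eq (2 * j + 1) b 0 hlo hhi]; push_cast; ring
      have hmod : PySem.Int.mod ((j:Int) + j + 2) 2 = 0 := by rw [md]; omega
      have hA : digitosContar b = -1 := by
        rw [digitosContar]
        simp only [hc, hmod]
        norm_num
      have hlo' : (100:Int) ^ j ≤ b := by
        rw [pow100]
        calc (10:Int) ^ (j + j) ≤ 10 ^ (2 * j + 1) := pow_le_pow_right₀ (by norm_num) (by omega)
          _ ≤ b := hlo
      have hhi' : b < 100 ^ (j + 1) := by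
        rw [pow100]
        calc b < 10 ^ (2 * j + 1 + 1) := hhi
          _ ≤ 10 ^ (j + 1 + (j + 1)) := pow_le_pow_right₀ (by norm_num) (by omega)
      have hpow : (0:Int) < 100 ^ j := by positivity
      have hh10 : (10:Int) ≤ b / 100 ^ j := by
        rw [Int.le_ediv_iff_mul_le hpow, pow100]
        calc (10:Int) * 10 ^ (j + j) = 10 ^ (2 * j + 1) := by ring
          _ ≤ b := hlo
      have hB : digitosContar_alt b = -1 := by
        rw [digitosContar_alt, if_neg (by omega)]
        simp only [alt_loop_eq j b b hlo' hhi']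
        rw [if_pos (by simp; omega)]
      rw [hA, hB]

-- ===== VERDICT (by name: the statement is the Claim_ definition above) =====
theorem digitosContar_spec : Claim_equal_digitosContar := by
  intro b _; exact main_lemma b
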